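-- pv_equiv track=rewrite | github.com/Hmdgt2/tol | heuristicas/comb_balanceadas.py | prever
-- ===== SOURCE A (Python) =====
-- from typing import Dict, Any, List
--
-- def prever(estatisticas: Dict[str, Any], n: int = 5) -> List[int]:
--     """
--     Prevê números com base em combinações balanceadas de paridade e posição.
--
--     Args:
--         estatisticas (dict): Dicionário com as estatísticas de que a heurística depende.
--         n (int): O número de sugestões a retornar.
--
--     Returns:
--         list: Uma lista de números sugeridos.
--     """
--     # Acessa diretamente a estatística de frequência total.
--     frequencia_total = estatisticas.get('frequencia_total', {})
--
--     if not frequencia_total: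
--         return []
--
--     # Divide números em pares/ímpares
--     pares = sorted([num for num in frequencia_total if num % 2 == 0], key=lambda x: frequencia_total[x], reverse=True)
--     impares = sorted([num for num in frequencia_total if num % 2 != 0], key=lambda x: frequencia_total[x], reverse=True)
--
--     # Divide números em altos/baixos (1-24 baixos, 25-49 altos)
--     baixos = sorted([num for num in frequencia_total if num <= 24], key=lambda x: frequencia_total[x], reverse=True)
--     altos = sorted([num for num in frequencia_total if num >= 25], key=lambda x: frequencia_total[x], reverse=True)
--
--     # Seleciona os mais frequentes de cada categoria de forma equilibrada.
--     sugeridos = []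
--     grupos = [pares, impares, baixos, altos]
--
--     # A lógica aqui foi simplificada para pegar um número de cada grupo por vez,
--     # garantindo uma combinação mais balanceada desde o início.
--     num_por_grupo = n // len(grupos)
--
--     # Preenche a lista com base na frequência e no balanceamento.
--     for grupo in grupos:
--         for _ in range(num_por_grupo):
--             if grupo:
--                 sugeridos.append(grupo.pop(0))
--
--     # Se ainda faltarem números para atingir 'n', completa com os mais frequentes no geral.
--     frequencia_ordenada = sorted(frequencia_total.keys(), key=lambda x: frequencia_total[x], reverse=True)
--     for num in frequencia_ordenada:
--         if len(sugeridos) >= n: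
--             break
--         if num not in sugeridos:
--             sugeridos.append(num)
--
--     return sorted(sugeridos)
-- ===== SOURCE B (Python) =====
-- def prever(estatisticas, n=5):
--     frequencia_total = estatisticas.get('frequencia_total', {})
--     if not frequencia_total:
--         return []
--     # One descending-frequency sort; no group lists are ever materialised.
--     ordenada = sorted(frequencia_total, key=lambda x: frequencia_total[x], reverse=True)
--     # Single pass with four quota counters; a number is taken once per still-open
--     # category it belongs to (same multiset as per-group top picks; the final
--     # sorted() makes the interleaved order irrelevant).
--     q1 = q2 = q3 = q4 = n // 4
--     sugeridos = []
--     for x in ordenada: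
--         if q1 > 0 and x % 2 == 0:
--             q1 -= 1
--             sugeridos.append(x)
--         if q2 > 0 and x % 2 != 0:
--             q2 -= 1
--             sugeridos.append(x)
--         if q3 > 0 and x <= 24:
--             q3 -= 1
--             sugeridos.append(x)
--         if q4 > 0 and x >= 25:
--             q4 -= 1
--             sugeridos.append(x)
--     for num in ordenada:
--         if len(sugeridos) >= n:
--             break
--         if num not in sugeridos:
--             sugeridos.append(num)
--     return sorted(sugeridos)
-- ===== Notes on version B (the rewrite author's own statement) =====
-- stated objective: alternative
-- what changed: B replaces A's four materialised group lists (each separately sorted and consumed by pop(0) loops) with a single pass over the one descending-frequency order carrying four quota counters, appending a number once per still-open category; this yields the same multiset of picks, which the final sorted() maps to A's exact result.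
import Mathlib
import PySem

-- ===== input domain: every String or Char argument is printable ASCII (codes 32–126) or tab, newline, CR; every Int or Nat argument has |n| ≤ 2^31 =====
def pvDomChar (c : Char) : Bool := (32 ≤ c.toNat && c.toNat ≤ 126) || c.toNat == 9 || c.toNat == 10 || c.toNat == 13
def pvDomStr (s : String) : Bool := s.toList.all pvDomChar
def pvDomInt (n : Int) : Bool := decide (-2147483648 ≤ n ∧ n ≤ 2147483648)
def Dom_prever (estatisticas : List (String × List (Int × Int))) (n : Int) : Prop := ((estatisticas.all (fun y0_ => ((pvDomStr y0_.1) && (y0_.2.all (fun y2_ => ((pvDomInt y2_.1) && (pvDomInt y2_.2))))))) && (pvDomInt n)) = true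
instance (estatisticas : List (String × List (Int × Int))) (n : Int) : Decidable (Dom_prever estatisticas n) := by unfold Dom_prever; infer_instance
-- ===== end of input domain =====

-- B replaces A's four materialised, separately sorted group lists and pop(0) loops by ONE pass
-- over the single descending-frequency order carrying four quota counters (objective: alternative).

-- ===== PORT A =====
-- inner loop of A: 'for _ in range(k): if grupo: sugeridos.append(grupo.pop(0))'
def pvPickA : Nat → List Int → List Int → List Int × List Int
  | 0, g, sug => (g, sug)
  | k + 1, [], sug => pvPickA k [] sug
  | k + 1, x :: rest, sug => pvPickA k rest (sug ++ [x])

-- fill loop of A: 'for num in frequencia_ordenada: if len(sugeridos) >= n: break; if num not in sugeridos: sugeridos.append(num)'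
def pvFillA (n : Int) : List Int → List Int → List Int
  | [], sug => sug
  | x :: rest, sug =>
    if n ≤ (sug.length : Int) then sug
    else pvFillA n rest (if sug.contains x then sug else sug ++ [x])

def prever (estatisticas : List (String × List (Int × Int))) (n : Int) : List Int :=
  let ftd : PySem.Dict Int Int :=
    PySem.Dict.ofList ((PySem.Dict.ofList estatisticas).getD "frequencia_total" [])
  if ftd.keys.isEmpty then []
  else
    let freq : Int → Int := fun x => ftd.getD x 0
    let pares := PySem.List.sorted (ftd.keys.filter (fun x => PySem.Int.mod x 2 == 0)) freq true
    let impares := PySem.List.sorted (ftd.keys.filter (fun x => !(PySem.Int.mod x 2 == 0))) freq true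
    let baixos := PySem.List.sorted (ftd.keys.filter (fun x => decide (x ≤ 24))) freq true
    let altos := PySem.List.sorted (ftd.keys.filter (fun x => decide (25 ≤ x))) freq true
    let numPorGrupo := (PySem.Int.floordiv n 4).toNat
    let sugeridos := [pares, impares, baixos, altos].foldl
      (fun sug grupo => (pvPickA numPorGrupo grupo sug).2) []
    let ordenada := PySem.List.sorted ftd.keys freq true
    PySem.List.sorted (pvFillA n ordenada sugeridos) (fun x => x)

-- ===== PORT B =====
-- body of B's single pass: the four sequential 'if q_i > 0 and <test>: q_i -= 1; sugeridos.append(x)'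
def pvStepB (st : (Int × Int × Int × Int) × List Int) (x : Int) : (Int × Int × Int × Int) × List Int :=
  let s1 := if 0 < st.1.1 ∧ PySem.Int.mod x 2 == 0 then (st.1.1 - 1, st.2 ++ [x]) else (st.1.1, st.2)
  let s2 := if 0 < st.1.2.1 ∧ ¬(PySem.Int.mod x 2 == 0) then (st.1.2.1 - 1, s1.2 ++ [x]) else (st.1.2.1, s1.2)
  let s3 := if 0 < st.1.2.2.1 ∧ x ≤ 24 then (st.1.2.2.1 - 1, s2.2 ++ [x]) else (st.1.2.2.1, s2.2)
  let s4 := if 0 < st.1.2.2.2 ∧ 25 ≤ x then (st.1.2.2.2 - 1, s3.2 ++ [x]) else (st.1.2.2.2, s3.2)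
  ((s1.1, s2.1, s3.1, s4.1), s4.2)

-- fill loop of B (same final loop as in Source B)
def pvFillB (n : Int) : List Int → List Int → List Int
  | [], sug => sug
  | x :: rest, sug =>
    if n ≤ (sug.length : Int) then sug
    else pvFillB n rest (if sug.contains x then sug else sug ++ [x])

def prever_alt (estatisticas : List (String × List (Int × Int))) (n : Int) : List Int :=
  let ftd : PySem.Dict Int Int :=
    PySem.Dict.ofList ((PySem.Dict.ofList estatisticas).getD "frequencia_total" [])
  if ftd.keys.isEmpty then []
  else
    let freq : Int → Int := fun x => ftd.getD x 0
    let ordenada := PySem.List.sorted ftd.keys freq true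
    let q := PySem.Int.floordiv n 4
    let sugeridos := (ordenada.foldl pvStepB ((q, q, q, q), [])).2
    PySem.List.sorted (pvFillB n ordenada sugeridos) (fun x => x)

-- ===== PRECONDITION & SPEC =====
def Spec_prever (estatisticas : List (String × List (Int × Int))) (n : Int) (out : List Int) : Prop := out = prever_alt estatisticas n
instance (estatisticas : List (String × List (Int × Int))) (n : Int) (out : List Int) : Decidable (Spec_prever estatisticas n out) := by unfold Spec_prever; infer_instance

-- ===== CLAIM =====
def Claim_equal_prever : Prop := ∀ (estatisticas : List (String × List (Int × Int))) (n : Int), Dom_prever estatisticas n → Spec_prever estatisticas n (prever estatisticas n)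

-- ===== LEMMAS AND PROOFS =====

theorem pvPickA_eq (k : Nat) (g sug : List Int) :
    pvPickA k g sug = (g.drop k, sug ++ g.take k) := by
  induction k generalizing g sug with
  | zero => simp [pvPickA]
  | succ k ih =>
    cases g with
    | nil => simp [pvPickA, ih]
    | cons x rest => simp [pvPickA, ih]

theorem pvInsertBy_all_lt (key : Int → Int) (x : Int) (zs : List Int)
    (h : ∀ z ∈ zs, key z < key x) :
    PySem.List.insertBy (fun a b => decide (key b < key a)) x zs = x :: zs := by
  cases zs with
  | nil => rfl
  | cons z zt => simp [PySem.List.insertBy, h z (by simp)]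

theorem pvFilter_insertBy (key : Int → Int) (p : Int → Bool) (x : Int) (ys : List Int)
    (hys : ys.Pairwise (fun a b => key b ≤ key a)) :
    (PySem.List.insertBy (fun a b => decide (key b < key a)) x ys).filter p =
      if p x then PySem.List.insertBy (fun a b => decide (key b < key a)) x (ys.filter p)
      else ys.filter p := by
  induction ys with
  | nil => cases hpx : p x <;> simp [PySem.List.insertBy, List.filter, hpx]
  | cons y yt ih =>
    rcases List.pairwise_cons.mp hys with ⟨hall, htail⟩
    by_cases hlt : key y < key x
    · have hins : PySem.List.insertBy (fun a b => decide (key b < key a)) x (y :: yt)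
          = x :: y :: yt := by simp [PySem.List.insertBy, hlt]
      rw [hins]
      cases hpx : p x with
      | false => simp [List.filter, hpx]
      | true =>
        have hcons : PySem.List.insertBy (fun a b => decide (key b < key a)) x ((y :: yt).filter p)
            = x :: (y :: yt).filter p := by
          apply pvInsertBy_all_lt
          intro z hz
          have hzm : z ∈ y :: yt := List.mem_of_mem_filter hz
          rcases List.mem_cons.mp hzm with h | h
          · exact h ▸ hlt
          · exact lt_of_le_of_lt (hall z h) hlt
        rw [List.filter_cons_of_pos hpx, if_pos rfl, hcons]
    · have hins : PySem.List.insertBy (fun a b => decide (key b < key a)) x (y :: yt)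
          = y :: PySem.List.insertBy (fun a b => decide (key b < key a)) x yt := by
        simp [PySem.List.insertBy, hlt]
      rw [hins]
      cases hpy : p y with
      | false => simp [List.filter, hpy, ih htail]
      | true =>
        cases hpx : p x with
        | false => simp [List.filter, hpy, hpx, ih htail]
        | true =>
          have : PySem.List.insertBy (fun a b => decide (key b < key a)) x (y :: yt.filter p)
              = y :: PySem.List.insertBy (fun a b => decide (key b < key a)) x (yt.filter p) := by
            simp [PySem.List.insertBy, hlt]
          simp [List.filter, hpy, hpx, ih htail, this]

theorem pvFilter_sorted (key : Int → Int) (p : Int → Bool) (xs : List Int) :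
    (PySem.List.sorted xs key true).filter p = PySem.List.sorted (xs.filter p) key true := by
  induction xs using List.reverseRecOn with
  | nil => rfl
  | append_singleton xs x ih =>
    have hpw : (PySem.List.sorted xs key true).Pairwise (fun a b => key b ≤ key a) :=
      PySem.List.sorted_pairwise_rev xs key
    rw [PySem.List.sorted_rev_eq_foldl_insertBy, List.foldl_append,
      ← PySem.List.sorted_rev_eq_foldl_insertBy]
    simp only [List.foldl]
    rw [pvFilter_insertBy key p x _ hpw, List.filter_append]
    cases hpx : p x with
    | false =>
      simp only [Bool.false_eq_true, if_false]
      rw [ih]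
      simp [hpx]
    | true =>
      rw [if_pos rfl, ih]
      have hfx : List.filter p [x] = [x] := by simp [hpx]
      rw [hfx, PySem.List.sorted_rev_eq_foldl_insertBy (xs.filter p ++ [x]) key,
        List.foldl_append, ← PySem.List.sorted_rev_eq_foldl_insertBy]
      simp only [List.foldl]

-- take q of a filtered cons, counter as an Int, condition abstracted as a Prop
theorem pvTakeFilterCons (p : Int → Bool) (q x : Int) (xs : List Int)
    (c : Prop) [Decidable c] (hc : c ↔ p x = true) :
    ((x :: xs).filter p).take q.toNat =
      (if 0 < q ∧ c then [x] else []) ++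
        (xs.filter p).take (if 0 < q ∧ c then q - 1 else q).toNat := by
  by_cases hcc : 0 < q ∧ c
  · rw [if_pos hcc, if_pos hcc, List.filter_cons_of_pos (hc.mp hcc.2)]
    have hq := hcc.1
    have hh : q.toNat = (q - 1).toNat + 1 := by omega
    rw [hh, List.take_succ_cons]
    rfl
  · rw [if_neg hcc, if_neg hcc, List.nil_append, List.filter_cons]
    by_cases hpx : p x = true
    · have hq : ¬ 0 < q := fun h => hcc ⟨h, hc.mpr hpx⟩
      have hh : q.toNat = 0 := by omega
      simp [hpx, hh]
    · simp [hpx]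

-- pvStepB written as one tuple of commuted conditionals
theorem pvStepB_eq (q1 q2 q3 q4 : Int) (sug : List Int) (x : Int) :
    pvStepB ((q1, q2, q3, q4), sug) x =
      ((if 0 < q1 ∧ PySem.Int.mod x 2 == 0 then q1 - 1 else q1,
        if 0 < q2 ∧ ¬(PySem.Int.mod x 2 == 0) then q2 - 1 else q2,
        if 0 < q3 ∧ x ≤ 24 then q3 - 1 else q3,
        if 0 < q4 ∧ 25 ≤ x then q4 - 1 else q4),
       sug ++ ((if 0 < q1 ∧ PySem.Int.mod x 2 == 0 then [x] else []) ++
         ((if 0 < q2 ∧ ¬(PySem.Int.mod x 2 == 0) then [x] else []) ++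
         ((if 0 < q3 ∧ x ≤ 24 then [x] else []) ++
          (if 0 < q4 ∧ 25 ≤ x then [x] else []))))) := by
  unfold pvStepB
  split_ifs <;> simp [List.append_assoc]

-- the single pass produces the same multiset as the four per-group top-quota picks
theorem pvFoldB_perm (xs : List Int) : ∀ (q1 q2 q3 q4 : Int) (sug : List Int),
    ((xs.foldl pvStepB ((q1, q2, q3, q4), sug)).2).Perm
      (sug ++ ((xs.filter (fun x => PySem.Int.mod x 2 == 0)).take q1.toNat
        ++ ((xs.filter (fun x => !(PySem.Int.mod x 2 == 0))).take q2.toNat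
        ++ ((xs.filter (fun x => decide (x ≤ 24))).take q3.toNat
        ++ (xs.filter (fun x => decide (25 ≤ x))).take q4.toNat)))) := by
  induction xs with
  | nil => intro q1 q2 q3 q4 sug; simp [List.foldl]
  | cons x xs ih =>
    intro q1 q2 q3 q4 sug
    rw [List.foldl_cons, pvStepB_eq]
    refine (ih _ _ _ _ _).trans ?_
    rw [pvTakeFilterCons (fun x => PySem.Int.mod x 2 == 0) q1 x xs
          (PySem.Int.mod x 2 == 0) Iff.rfl,
        pvTakeFilterCons (fun x => !(PySem.Int.mod x 2 == 0)) q2 x xs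
          (¬(PySem.Int.mod x 2 == 0)) (by simp),
        pvTakeFilterCons (fun x => decide (x ≤ 24)) q3 x xs (x ≤ 24) (by simp),
        pvTakeFilterCons (fun x => decide (25 ≤ x)) q4 x xs (25 ≤ x) (by simp)]
    refine List.perm_iff_count.mpr (fun y => ?_)
    simp only [List.count_append]
    split_ifs <;> simp [List.count_cons] <;> omega

-- the fill loop appends the same suffix to any two permuted accumulators
theorem pvFill_congr (n : Int) : ∀ (xs sugA sugB : List Int), sugA.Perm sugB →
    ∃ t, pvFillA n xs sugA = sugA ++ t ∧ pvFillB n xs sugB = sugB ++ t := by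
  intro xs
  induction xs with
  | nil => exact fun sugA sugB _ => ⟨[], by simp [pvFillA, pvFillB]⟩
  | cons x rest ih =>
    intro sugA sugB h
    have hlen : sugA.length = sugB.length := h.length_eq
    have hmem : (x ∈ sugA) ↔ (x ∈ sugB) := h.mem_iff
    by_cases hstop : n ≤ (sugA.length : Int)
    · refine ⟨[], ?_, ?_⟩ <;> simp [pvFillA, pvFillB, hstop, ← hlen]
    · by_cases hm : x ∈ sugA
      · obtain ⟨t, hA, hB⟩ := ih sugA sugB h
        have hmB : x ∈ sugB := hmem.mp hm
        refine ⟨t, ?_, ?_⟩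
        · simp [pvFillA, hstop, hm, hA]
        · simp [pvFillB, hstop, ← hlen, hmB, hB]
      · obtain ⟨t, hA, hB⟩ := ih (sugA ++ [x]) (sugB ++ [x]) (h.append_right [x])
        have hmB : x ∉ sugB := fun hx => hm (hmem.mpr hx)
        refine ⟨x :: t, ?_, ?_⟩
        · simp [pvFillA, hstop, hm, hA]
        · simp [pvFillB, hstop, ← hlen, hmB, hB]

-- ===== VERDICT =====
theorem prever_spec : Claim_equal_prever := by
  intro est n _
  unfold Spec_prever prever prever_alt
  by_cases h : (PySem.Dict.ofList ((PySem.Dict.ofList est).getD "frequencia_total" [])).keys.isEmpty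
  · simp [h]
  · simp only [h, Bool.false_eq_true, if_false, List.foldl, pvPickA_eq]
    set ftd := PySem.Dict.ofList ((PySem.Dict.ofList est).getD "frequencia_total" []) with hftd
    set freq : Int → Int := fun x => ftd.getD x 0 with hfreq
    set ordenada := PySem.List.sorted ftd.keys freq true with hord
    set q := PySem.Int.floordiv n 4 with hq
    have heq : ([] ++ ((ordenada.filter (fun x => PySem.Int.mod x 2 == 0)).take q.toNat
          ++ ((ordenada.filter (fun x => !(PySem.Int.mod x 2 == 0))).take q.toNat
          ++ ((ordenada.filter (fun x => decide (x ≤ 24))).take q.toNat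
          ++ (ordenada.filter (fun x => decide (25 ≤ x))).take q.toNat))))
        = ([] ++ (PySem.List.sorted (ftd.keys.filter (fun x => PySem.Int.mod x 2 == 0)) freq true).take q.toNat
            ++ (PySem.List.sorted (ftd.keys.filter (fun x => !(PySem.Int.mod x 2 == 0))) freq true).take q.toNat
            ++ (PySem.List.sorted (ftd.keys.filter (fun x => decide (x ≤ 24))) freq true).take q.toNat
            ++ (PySem.List.sorted (ftd.keys.filter (fun x => decide (25 ≤ x))) freq true).take q.toNat) := by
      rw [hord]
      simp [pvFilter_sorted, List.append_assoc]
    have hperm : ((ordenada.foldl pvStepB ((q, q, q, q), [])).2).Perm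
        ([] ++ (PySem.List.sorted (ftd.keys.filter (fun x => PySem.Int.mod x 2 == 0)) freq true).take q.toNat
            ++ (PySem.List.sorted (ftd.keys.filter (fun x => !(PySem.Int.mod x 2 == 0))) freq true).take q.toNat
            ++ (PySem.List.sorted (ftd.keys.filter (fun x => decide (x ≤ 24))) freq true).take q.toNat
            ++ (PySem.List.sorted (ftd.keys.filter (fun x => decide (25 ≤ x))) freq true).take q.toNat) := by
      refine (pvFoldB_perm ordenada q q q q []).trans ?_
      rw [← heq]
    obtain ⟨t, hA, hB⟩ := pvFill_congr n ordenada _ _ hperm.symm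
    rw [hA, hB]
    exact (PySem.List.sorted_id_eq_sorted_id_iff_perm _ _).mpr ((hperm.symm).append_right t)
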